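-- pv_equiv track=rewrite | github.com/l3mnt2010/TTATTT | cau26.py | find_strong_number
-- ===== SOURCE A (Python) =====
-- def find_strong_number(n):
--     # gán mảng bằng full 0 có độ dài là n
--     result = [0]*n
--
--     # duyệt từ 4 đến n-1 với bước nhảy 1 đầu tiên gắn mảng lại là 0
--     for i in range(4, n):
--         result[i] = 0
--         # duyệt từ 2 đến i với bước nhảy là 1 -> khởi tạo biến flag là 0 sau đó
--         for j in range(2, i):
--             flag = 0
--             for k in range(2, j): # kiểm tra xem nếu j có ước nào lớn hơn 2 và nhỏ hơn j-1 không nếu có thì flag = 1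
--                 if j % k == 0:
--                     flag = 1
--             if flag != 1 and result[i] == 0:  # j là số nguyên tố vì có ước khác 1 và chính nó
--                 if i % (j*j) == 0:
--                     result[i] = 1
--     result2 = []
--     for i in range(4, n):
--         if result[i] == 1:
--              result2.append(i)
--     return result2
-- ===== SOURCE B (Python) =====
-- def find_strong_number(n):
--     # Sieve: mark every multiple of k*k (k >= 2, k*k < n) as non-squarefree,
--     # then collect the marked numbers in [4, n).
--     size = n if n > 0 else 0
--     marked = [False] * size
--     k = 2
--     while k * k < n:
--         step = k * k
--         for m in range(step, n, step):
--             marked[m] = True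
--         k += 1
--     return [i for i in range(4, n) if marked[i]]
-- ===== Notes on version B (the rewrite author's own statement) =====
-- stated objective: faster
-- what changed: A tests every candidate i against each smaller j with a full trial-division primality scan per j; B instead sieves once, marking every multiple of each square k*k below n, and collects the marked numbers.
import Mathlib
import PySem

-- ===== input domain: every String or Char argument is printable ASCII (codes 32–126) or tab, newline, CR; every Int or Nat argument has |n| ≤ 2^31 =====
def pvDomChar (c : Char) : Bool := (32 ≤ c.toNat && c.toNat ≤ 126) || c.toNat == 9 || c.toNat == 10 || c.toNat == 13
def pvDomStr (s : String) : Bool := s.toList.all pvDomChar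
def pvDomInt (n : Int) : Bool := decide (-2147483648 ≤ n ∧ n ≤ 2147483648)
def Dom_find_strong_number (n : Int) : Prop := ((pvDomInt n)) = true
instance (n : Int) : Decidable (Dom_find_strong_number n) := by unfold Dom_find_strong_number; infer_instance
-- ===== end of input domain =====

-- B replaces A's cubic trial-division scan with a square sieve marking multiples of k*k (objective: faster, asymptotic).

-- ===== PORT A =====
-- literal transliteration of A: result array of 0/1, triple nested loop, final collection pass.
-- All indices i used on `result` satisfy 4 ≤ i < n = len(result), so `i.toNat` and `getD` are exact here.
def find_strong_number (n : Int) : List Int :=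
  let result : List Int := List.replicate n.toNat 0        -- [0]*n  ([] when n ≤ 0, as in Python)
  let result := (PySem.List.pyRange 4 n 1).foldl (fun result i =>
    let result := result.set i.toNat 0                     -- result[i] = 0
    (PySem.List.pyRange 2 i 1).foldl (fun result j =>
      let flag := (PySem.List.pyRange 2 j 1).foldl
        (fun flag k => if PySem.Int.mod j k = 0 then (1 : Int) else flag) 0
      if flag ≠ 1 ∧ result.getD i.toNat 0 = 0 then
        if PySem.Int.mod i (j * j) = 0 then result.set i.toNat 1 else result
      else result) result) result
  (PySem.List.pyRange 4 n 1).foldl (fun acc i =>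
    if result.getD i.toNat 0 = 1 then acc ++ [i] else acc) []

-- ===== PORT B =====
-- while-loop of Source B: for each k with k*k < n mark every multiple of k*k in [k*k, n).
-- All marked positions m satisfy 0 ≤ m < n = len(marked), so `m.toNat`/`set`/`getD` are exact.
def altMark (n : Int) (k : Int) (marked : List Bool) : List Bool :=
  if h : k * k < n then
    let step := k * k
    let marked := (PySem.List.pyRange step n step).foldl
      (fun m x => m.set x.toNat true) marked
    altMark n (k + 1) marked
  else marked
termination_by (n - k).toNat
decreasing_by
  have hk : k < n := by nlinarith [sq_nonneg k, mul_self_nonneg k]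
  omega

def find_strong_number_alt (n : Int) : List Int :=
  let size : Int := if n > 0 then n else 0
  let marked : List Bool := List.replicate size.toNat false
  let marked := altMark n 2 marked
  (PySem.List.pyRange 4 n 1).foldl (fun acc i =>
    if marked.getD i.toNat false = true then acc ++ [i] else acc) []

-- ===== PRECONDITION & SPEC =====
def Spec_find_strong_number (n : Int) (out : List Int) : Prop := out = find_strong_number_alt n
instance (n : Int) (out : List Int) : Decidable (Spec_find_strong_number n out) := by unfold Spec_find_strong_number; infer_instance

-- ===== CLAIM (what is proved, stated in full; the proofs are below) =====
def Claim_equal_find_strong_number : Prop := ∀ (n : Int), Dom_find_strong_number n → Spec_find_strong_number n (find_strong_number n)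

-- ===== LEMMAS AND PROOFS =====

-- A's inner flag test: j passes (flag stays ≠ 1) iff no k ∈ [2, j) divides j.
abbrev primeT (j : Int) : Prop := ∀ k ∈ PySem.List.pyRange 2 j 1, PySem.Int.mod j k ≠ 0

-- the per-j condition that makes A write a 1 at index i
abbrev aCondAt (i j : Int) : Prop := primeT j ∧ PySem.Int.mod i (j * j) = 0

abbrev aCond (i : Int) : Prop := ∃ j ∈ PySem.List.pyRange 2 i 1, aCondAt i j

def bCond (n i : Int) : Prop := ∃ k, 2 ≤ k ∧ k * k < n ∧ i ∈ PySem.List.pyRange (k * k) n (k * k)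

-- the j-loop body of A
def jb (i : Int) (result : List Int) (j : Int) : List Int :=
  let flag := (PySem.List.pyRange 2 j 1).foldl
    (fun flag k => if PySem.Int.mod j k = 0 then (1 : Int) else flag) 0
  if flag ≠ 1 ∧ result.getD i.toNat 0 = 0 then
    if PySem.Int.mod i (j * j) = 0 then result.set i.toNat 1 else result
  else result

-- the i-loop body of A
def ib (result : List Int) (i : Int) : List Int :=
  (PySem.List.pyRange 2 i 1).foldl (jb i) (result.set i.toNat 0)

lemma flag_fold (j : Int) (l : List Int) (init : Int) :
    l.foldl (fun flag k => if PySem.Int.mod j k = 0 then (1 : Int) else flag) init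
      = if ∀ k ∈ l, PySem.Int.mod j k ≠ 0 then init else 1 := by
  induction l generalizing init with
  | nil => simp
  | cons a t ih =>
    simp only [List.foldl_cons]
    by_cases ha : PySem.Int.mod j a = 0
    · rw [if_pos ha, ih]
      have : ¬ (∀ k ∈ a :: t, PySem.Int.mod j k ≠ 0) := by
        intro h; exact h a (by simp) ha
      rw [if_neg this]
      split_ifs <;> rfl
    · rw [if_neg ha, ih]
      by_cases ht : ∀ k ∈ t, PySem.Int.mod j k ≠ 0
      · rw [if_pos ht, if_pos (by simpa [ha] using ht)]
      · rw [if_neg ht, if_neg (by intro h; exact ht fun k hk => h k (by simp [hk]))]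

lemma jb_eq (i j : Int) (result : List Int) :
    jb i result j =
      if aCondAt i j ∧ result.getD i.toNat 0 = 0 then result.set i.toNat 1 else result := by
  unfold jb aCondAt
  rw [flag_fold]
  by_cases hp : primeT j
  · have hp' : (∀ k ∈ PySem.List.pyRange 2 j 1, PySem.Int.mod j k ≠ 0) := hp
    simp only [if_pos hp']
    by_cases h0 : result.getD i.toNat 0 = 0
    · by_cases hm : PySem.Int.mod i (j * j) = 0
      · rw [if_pos ⟨by norm_num, h0⟩, if_pos hm, if_pos ⟨⟨hp, hm⟩, h0⟩]
      · rw [if_pos ⟨by norm_num, h0⟩, if_neg hm, if_neg (by tauto)]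
    · rw [if_neg (by tauto), if_neg (by tauto)]
  · have hp' : ¬ (∀ k ∈ PySem.List.pyRange 2 j 1, PySem.Int.mod j k ≠ 0) := hp
    simp only [if_neg hp']
    rw [if_neg (by simp), if_neg (by tauto)]

lemma jfold (i : Int) (l : List Int) (result : List Int)
    (hlen : i.toNat < result.length) :
    l.foldl (jb i) result =
      if (∃ j ∈ l, aCondAt i j) ∧ result.getD i.toNat 0 = 0
      then result.set i.toNat 1 else result := by
  induction l generalizing result with
  | nil => simp
  | cons a t ih =>
    simp only [List.foldl_cons]
    rw [jb_eq]
    by_cases h0 : result.getD i.toNat 0 = 0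
    · by_cases ha : aCondAt i a
      · rw [if_pos ⟨ha, h0⟩, ih _ (by simpa using hlen)]
        have h1 : (result.set i.toNat 1).getD i.toNat 0 = 1 := by
          simp [List.getD_eq_getElem?_getD, hlen]
        rw [if_neg (by rintro ⟨-, hz⟩; rw [h1] at hz; norm_num at hz),
            if_pos ⟨⟨a, by simp, ha⟩, h0⟩]
      · rw [if_neg (fun hc => ha hc.1), ih _ hlen]
        by_cases ht : ∃ j ∈ t, aCondAt i j
        · obtain ⟨j, hj, hcj⟩ := ht
          rw [if_pos ⟨⟨j, hj, hcj⟩, h0⟩, if_pos ⟨⟨j, by simp [hj], hcj⟩, h0⟩]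
        · rw [if_neg (fun hc => ht hc.1), if_neg (by
            rintro ⟨⟨j, hj, hcj⟩, -⟩
            rcases List.mem_cons.mp hj with rfl | hj'
            · exact ha hcj
            · exact ht ⟨j, hj', hcj⟩)]
    · rw [if_neg (fun hc => h0 hc.2), ih _ hlen, if_neg (fun hc => h0 hc.2),
          if_neg (fun hc => h0 hc.2)]

lemma ib_getD_self (result : List Int) (i : Int)
    (hlen : i.toNat < result.length) :
    (ib result i).getD i.toNat 0 = if aCond i then 1 else 0 := by
  unfold ib aCond
  rw [jfold _ _ _ (by simpa using hlen)]
  have h0 : (result.set i.toNat 0).getD i.toNat 0 = 0 := by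
    simp [List.getD_eq_getElem?_getD, hlen]
  by_cases hc : ∃ j ∈ PySem.List.pyRange 2 i 1, aCondAt i j
  · rw [if_pos ⟨hc, h0⟩, if_pos hc]
    simp [List.getD_eq_getElem?_getD, hlen]
  · rw [if_neg (fun hcc => hc hcc.1), if_neg hc, h0]

lemma jfold_getD_ne (i : Int) (l : List Int) (result : List Int) (m : Nat) (d : Int)
    (hne : i.toNat ≠ m) :
    (l.foldl (jb i) result).getD m d = result.getD m d := by
  induction l generalizing result with
  | nil => rfl
  | cons a t ih =>
    simp only [List.foldl_cons]
    rw [jb_eq]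
    split_ifs with h
    · rw [ih]; simp [List.getD_eq_getElem?_getD, List.getElem?_set_ne hne]
    · rw [ih]

lemma jfold_length (i : Int) (l : List Int) (result : List Int) :
    (l.foldl (jb i) result).length = result.length := by
  induction l generalizing result with
  | nil => rfl
  | cons a t ih =>
    simp only [List.foldl_cons]
    rw [jb_eq]
    split_ifs with h
    · rw [ih]; simp
    · rw [ih]

lemma ib_getD_ne (result : List Int) (i : Int) (m : Nat) (d : Int)
    (hne : i.toNat ≠ m) :
    (ib result i).getD m d = result.getD m d := by
  unfold ib
  rw [jfold_getD_ne _ _ _ _ _ hne]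
  simp [List.getD_eq_getElem?_getD, List.getElem?_set_ne hne]

lemma ib_length (result : List Int) (i : Int) :
    (ib result i).length = result.length := by
  unfold ib
  rw [jfold_length]
  simp

lemma outer_ne (l : List Int) (result : List Int) (m : Nat) (d : Int)
    (h : ∀ x ∈ l, x.toNat ≠ m) :
    (l.foldl ib result).getD m d = result.getD m d := by
  induction l generalizing result with
  | nil => rfl
  | cons a t ih =>
    simp only [List.foldl_cons]
    rw [ih _ (fun x hx => h x (by simp [hx])),
        ib_getD_ne _ _ _ _ (h a (by simp))]

lemma outer_getD (l : List Int) (result : List Int) (i0 : Int)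
    (hb : ∀ x ∈ l, 4 ≤ x ∧ x.toNat < result.length)
    (hmem : i0 ∈ l) :
    (l.foldl ib result).getD i0.toNat 0 = if aCond i0 then 1 else 0 := by
  induction l generalizing result with
  | nil => cases hmem
  | cons a t ih =>
    simp only [List.foldl_cons]
    by_cases ht : i0 ∈ t
    · exact ih _ (fun x hx => by
        have := hb x (by simp [hx]); rwa [ib_length]) ht
    · have hai : i0 = a := by rcases List.mem_cons.mp hmem with h | h; exact h; exact absurd h ht
      subst hai
      have hne : ∀ x ∈ t, x.toNat ≠ i0.toNat := by
        intro x hx hEq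
        have hx4 := (hb x (by simp [hx])).1
        have hi4 := (hb i0 (by simp)).1
        have : x = i0 := by omega
        exact ht (this ▸ hx)
      rw [outer_ne _ _ _ _ hne, ib_getD_self _ _ (hb i0 (by simp)).2]

lemma mark_fold_getD (l : List Int) (mk : List Bool) (m : Nat)
    (hb : ∀ x ∈ l, 0 ≤ x ∧ x.toNat < mk.length) :
    ((l.foldl (fun mk x => mk.set x.toNat true) mk).getD m false = true
      ↔ mk.getD m false = true ∨ ∃ x ∈ l, x.toNat = m) := by
  induction l generalizing mk with
  | nil => simp
  | cons a t ih =>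
    simp only [List.foldl_cons]
    rw [ih _ (fun x hx => by have := hb x (by simp [hx]); simpa using this)]
    by_cases ha : a.toNat = m
    · subst ha
      have : (mk.set a.toNat true).getD a.toNat false = true := by
        simp [List.getD_eq_getElem?_getD, (hb a (by simp)).2]
      rw [this]
      constructor
      · intro _; exact Or.inr ⟨a, by simp, rfl⟩
      · intro _; exact Or.inl rfl
    · have : (mk.set a.toNat true).getD m false = mk.getD m false := by
        simp [List.getD_eq_getElem?_getD, List.getElem?_set_ne ha]
      rw [this]
      constructor
      · rintro (h | ⟨x, hx, hxm⟩)
        · exact Or.inl h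
        · exact Or.inr ⟨x, by simp [hx], hxm⟩
      · rintro (h | ⟨x, hx, hxm⟩)
        · exact Or.inl h
        · rcases List.mem_cons.mp hx with rfl | hx'
          · exact absurd hxm ha
          · exact Or.inr ⟨x, hx', hxm⟩

lemma mark_fold_length (l : List Int) (mk : List Bool) :
    (l.foldl (fun mk x => mk.set x.toNat true) mk).length = mk.length := by
  induction l generalizing mk with
  | nil => rfl
  | cons a t ih => simp [List.foldl_cons, ih]

lemma altMark_length (n k : Int) (mk : List Bool) :
    (altMark n k mk).length = mk.length := by
  unfold altMark
  split_ifs with h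
  · rw [altMark_length, mark_fold_length]
  · rfl
termination_by (n - k).toNat
decreasing_by
  have hk : k < n := by nlinarith [sq_nonneg k]
  omega

lemma altMark_getD (n : Int) (k : Int) (mk : List Bool) (m : Nat)
    (hk2 : 2 ≤ k) (hlen : mk.length = n.toNat) :
    ((altMark n k mk).getD m false = true
      ↔ mk.getD m false = true ∨
        ∃ k', k ≤ k' ∧ k' * k' < n ∧ (m : Int) ∈ PySem.List.pyRange (k' * k') n (k' * k')) := by
  unfold altMark
  split_ifs with h
  · have hkpos : (0 : Int) < k * k := by nlinarith
    have hb : ∀ x ∈ PySem.List.pyRange (k * k) n (k * k), 0 ≤ x ∧ x.toNat < mk.length := by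
      intro x hx
      obtain ⟨h1, h2, -⟩ := (PySem.List.mem_pyRange_iff_of_pos hkpos x).mp hx
      constructor
      · omega
      · omega
    rw [altMark_getD n (k + 1) _ m (by omega) (by rw [mark_fold_length]; exact hlen)]
    rw [mark_fold_getD _ _ _ hb]
    constructor
    · rintro ((hmk | ⟨x, hx, hxm⟩) | ⟨k', hk', hkn', hmem'⟩)
      · exact Or.inl hmk
      · refine Or.inr ⟨k, le_refl k, h, ?_⟩
        have hx0 : 0 ≤ x := (hb x hx).1
        have : x = (m : Int) := by omega
        rwa [this] at hx
      · exact Or.inr ⟨k', by omega, hkn', hmem'⟩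
    · rintro (hmk | ⟨k', hk', hkn', hmem'⟩)
      · exact Or.inl (Or.inl hmk)
      · rcases eq_or_lt_of_le hk' with rfl | hlt
        · exact Or.inl (Or.inr ⟨(m : Int), hmem', by omega⟩)
        · exact Or.inr ⟨k', by omega, hkn', hmem'⟩
  · constructor
    · intro hmk; exact Or.inl hmk
    · rintro (hmk | ⟨k', hk', hkn', -⟩)
      · exact hmk
      · exact absurd hkn' (by nlinarith)
termination_by (n - k).toNat
decreasing_by
  have hk : k < n := by nlinarith [sq_nonneg k]
  omega

-- arithmetic core: for 4 ≤ i < n, A's condition equals B's condition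
lemma primeT_of_prime (p : Nat) (hp : p.Prime) : primeT (p : Int) := by
  intro m hm hmod
  obtain ⟨h2, hlt⟩ := PySem.List.mem_pyRange_one.mp hm
  have hdvd : m ∣ (p : Int) := (PySem.Int.mod_eq_zero_iff_dvd _ _).mp hmod
  have hm0 : 0 ≤ m := by omega
  obtain ⟨mn, rfl⟩ := Int.eq_ofNat_of_zero_le hm0
  have : mn ∣ p := Int.natCast_dvd_natCast.mp hdvd
  rcases (Nat.Prime.eq_one_or_self_of_dvd hp mn this) with h | h <;> omega

lemma aCond_iff_bCond (n i : Int) (h4 : 4 ≤ i) (hin : i < n) :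
    aCond i ↔ bCond n i := by
  constructor
  · rintro ⟨j, hj, hp, hm⟩
    obtain ⟨hj2, hji⟩ := PySem.List.mem_pyRange_one.mp hj
    have hdvd : j * j ∣ i := (PySem.Int.mod_eq_zero_iff_dvd _ _).mp hm
    have hjj : j * j ≤ i := Int.le_of_dvd (by omega) hdvd
    have hpos : (0 : Int) < j * j := by positivity
    refine ⟨j, hj2, by omega, ?_⟩
    exact (PySem.List.mem_pyRange_iff_of_pos hpos i).mpr
      ⟨hjj, by omega, dvd_sub hdvd dvd_rfl⟩
  · rintro ⟨k, hk2, hkn, hmem⟩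
    have hkpos : (0 : Int) < k * k := by positivity
    obtain ⟨hle, hlt, hdv⟩ := (PySem.List.mem_pyRange_iff_of_pos hkpos i).mp hmem
    have hdvd : k * k ∣ i := by
      have := dvd_add hdv (dvd_refl (k * k))
      simpa using this
    set K := k.toNat with hK
    have hK2 : 2 ≤ K := by omega
    have hpprime : K.minFac.Prime := Nat.minFac_prime (by omega)
    have hpdvd : (K.minFac : Int) ∣ k := by
      have h1 : K.minFac ∣ K := Nat.minFac_dvd K
      have : (K.minFac : Int) ∣ (K : Int) := Int.natCast_dvd_natCast.mpr h1
      simpa [hK, Int.toNat_of_nonneg (by omega : (0:Int) ≤ k)] using this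
    have hp2 : 2 ≤ (K.minFac : Int) := by exact_mod_cast hpprime.two_le
    have hple : (K.minFac : Int) ≤ k := by
      have := Int.le_of_dvd (by omega) hpdvd
      omega
    have hki : k < i := by nlinarith
    refine ⟨(K.minFac : Int), PySem.List.mem_pyRange_one.mpr ⟨hp2, by omega⟩,
      primeT_of_prime _ hpprime, (PySem.Int.mod_eq_zero_iff_dvd _ _).mpr ?_⟩
    exact dvd_trans (mul_dvd_mul hpdvd hpdvd) hdvd

lemma replicate_getD_bool (c : Nat) (m : Nat) : (List.replicate c false).getD m false = false := by
  simp only [List.getD_eq_getElem?_getD, List.getElem?_replicate]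
  split_ifs <;> rfl

-- ===== VERDICT (by name: the statement is the Claim_ definition above) =====
theorem find_strong_number_spec : Claim_equal_find_strong_number := by
  intro n _
  unfold Spec_find_strong_number
  have hA : find_strong_number n =
      (PySem.List.pyRange 4 n 1).foldl (fun acc i =>
        if ((PySem.List.pyRange 4 n 1).foldl ib (List.replicate n.toNat 0)).getD i.toNat 0 = 1
        then acc ++ [i] else acc) [] := rfl
  have hB : find_strong_number_alt n =
      (PySem.List.pyRange 4 n 1).foldl (fun acc i =>
        if (altMark n 2 (List.replicate (if n > 0 then n else 0).toNat false)).getD i.toNat false = true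
        then acc ++ [i] else acc) [] := rfl
  have e1 := PySem.List.foldl_append_ite_eq_filter
      (fun i => ((PySem.List.pyRange 4 n 1).foldl ib (List.replicate n.toNat 0)).getD i.toNat 0 = 1)
      (PySem.List.pyRange 4 n 1) ([] : List Int)
  have e2 := PySem.List.foldl_append_ite_eq_filter
      (fun i => (altMark n 2 (List.replicate (if n > 0 then n else 0).toNat false)).getD i.toNat false = true)
      (PySem.List.pyRange 4 n 1) ([] : List Int)
  rw [hA, hB, e1, e2]
  simp only [List.nil_append]
  apply List.filter_congr
  intro i hi
  obtain ⟨hi4, hin⟩ := PySem.List.mem_pyRange_one.mp hi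
  have hn0 : 0 < n := by omega
  have hsize : (if n > 0 then n else 0).toNat = n.toNat := by rw [if_pos hn0]
  have hAval : ((PySem.List.pyRange 4 n 1).foldl ib (List.replicate n.toNat 0)).getD i.toNat 0
      = if aCond i then 1 else 0 := by
    apply outer_getD _ _ _ _ hi
    intro x hx
    obtain ⟨hx4, hxn⟩ := PySem.List.mem_pyRange_one.mp hx
    exact ⟨hx4, by simp; omega⟩
  have hBval : (altMark n 2 (List.replicate (if n > 0 then n else 0).toNat false)).getD i.toNat false = true
      ↔ bCond n i := by
    rw [altMark_getD n 2 _ i.toNat (by norm_num) (by simp [hsize])]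
    rw [replicate_getD_bool]
    have hicast : ((i.toNat : Int)) = i := Int.toNat_of_nonneg (by omega)
    unfold bCond
    rw [hicast]
    simp
  have hiff : (((PySem.List.pyRange 4 n 1).foldl ib (List.replicate n.toNat 0)).getD i.toNat 0 = 1)
      ↔ ((altMark n 2 (List.replicate (if n > 0 then n else 0).toNat false)).getD i.toNat false = true) := by
    rw [hAval, hBval, ← aCond_iff_bCond n i hi4 hin]
    split_ifs with hc
    · simp [hc]
    · simp [hc]
  exact decide_eq_decide.mpr hiff
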